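-- pv_equiv track=rewrite | github.com/Crunch-io/apidocs-sphinx | scripts/transform_code_blocks.py | _coalesce_code_blocks
-- ===== SOURCE A (Python) =====
-- def _coalesce_code_blocks(code_blocks):
--     """
--     Combine consecutive code blocks with the same language, putting one
--     blank line between them.
--     """
--     code_blocks_result = []
--     prev_language = None
--     for language, code_lines in code_blocks:
--         if language != prev_language:
--             prev_language = language
--             code_blocks_result.append((language, list(code_lines)))
--         else:
--             # Blank line to separate from previous block of same language
--             code_blocks_result[-1][1].append('\n')
--             code_blocks_result[-1][1].extend(code_lines)
--     return code_blocks_result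
-- ===== SOURCE B (Python) =====
-- def _coalesce_code_blocks(code_blocks):
--     """
--     Combine consecutive code blocks with the same language, putting one
--     blank line between them.
--     """
--     blocks = list(code_blocks)
--     result = []
--     i = 0
--     n = len(blocks)
--     while i < n:
--         language, code_lines = blocks[i]
--         merged = list(code_lines)
--         j = i + 1
--         while j < n and blocks[j][0] == language:
--             merged.append('\n')
--             merged.extend(blocks[j][1])
--             j += 1
--         result.append((language, merged))
--         i = j
--     return result
-- ===== Notes on version B (the rewrite author's own statement) =====
-- stated objective: alternative
-- what changed: B groups each maximal run of consecutive same-language blocks with a nested scan (group-then-merge), instead of A's single pass that mutates the last emitted pair via a prev_language accumulator.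
import Mathlib
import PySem

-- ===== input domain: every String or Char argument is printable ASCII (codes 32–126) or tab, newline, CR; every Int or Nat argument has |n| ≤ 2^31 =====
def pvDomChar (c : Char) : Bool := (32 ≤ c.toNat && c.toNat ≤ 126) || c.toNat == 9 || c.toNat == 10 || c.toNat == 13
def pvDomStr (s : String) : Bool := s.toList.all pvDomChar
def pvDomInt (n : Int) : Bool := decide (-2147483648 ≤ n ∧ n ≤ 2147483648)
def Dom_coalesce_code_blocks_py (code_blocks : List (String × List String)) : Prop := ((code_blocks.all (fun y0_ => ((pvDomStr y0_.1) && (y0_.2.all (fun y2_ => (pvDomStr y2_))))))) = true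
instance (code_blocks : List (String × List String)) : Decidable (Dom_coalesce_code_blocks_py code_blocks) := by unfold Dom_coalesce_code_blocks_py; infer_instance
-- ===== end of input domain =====

-- B merges each maximal run of consecutive same-language blocks with a nested group-then-merge
-- scan instead of A's prev_language accumulator mutating the last emitted pair (objective: alternative).

-- ===== PORT A =====
-- code_blocks_result[-1][1].append('\n'); ...extend(code_lines): rebuild the list with the last
-- pair's lines extended.  The [] case is Python's IndexError on an empty result; with String
-- languages it is unreachable (prev_language starts as None, which no string equals).
def pvExtendLast (res : List (String × List String)) (ls : List String) : List (String × List String) :=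
  match res.getLast? with
  | none => []
  | some (l, prev) => res.dropLast ++ [(l, prev ++ "\n" :: ls)]

def coalesce_code_blocks_py (code_blocks : List (String × List String)) : List (String × List String) :=
  (code_blocks.foldl
    (fun (st : List (String × List String) × Option String) b =>
      if some b.1 ≠ st.2 then (st.1 ++ [(b.1, b.2)], some b.1)
      else (pvExtendLast st.1 b.2, st.2))
    ([], none)).1

-- ===== PORT B =====
-- inner while: collect '\n'-separated lines of the following same-language blocks, return the rest
def pvTakeGroup (lang : String) : List (String × List String) → List String × List (String × List String)
  | [] => ([], [])
  | (l, ls) :: rest =>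
      if l = lang then
        let p := pvTakeGroup lang rest
        ("\n" :: (ls ++ p.1), p.2)
      else ([], (l, ls) :: rest)

theorem pvTakeGroup_len (lang : String) (xs : List (String × List String)) :
    (pvTakeGroup lang xs).2.length ≤ xs.length := by
  induction xs with
  | nil => simp [pvTakeGroup]
  | cons x rest ih =>
      obtain ⟨l, ls⟩ := x
      simp only [pvTakeGroup]
      split
      · simpa using Nat.le_succ_of_le ih
      · simp

def coalesce_code_blocks_py_alt (code_blocks : List (String × List String)) : List (String × List String) :=
  match code_blocks with
  | [] => []
  | (lang, lines) :: rest =>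
      let p := pvTakeGroup lang rest
      (lang, lines ++ p.1) :: coalesce_code_blocks_py_alt p.2
termination_by code_blocks.length
decreasing_by
  simpa using Nat.lt_succ_of_le (pvTakeGroup_len lang rest)

-- ===== PRECONDITION & SPEC =====
def Spec_coalesce_code_blocks_py (code_blocks : List (String × List String)) (out : List (String × List String)) : Prop := out = coalesce_code_blocks_py_alt code_blocks
instance (code_blocks : List (String × List String)) (out : List (String × List String)) : Decidable (Spec_coalesce_code_blocks_py code_blocks out) := by unfold Spec_coalesce_code_blocks_py; infer_instance

-- ===== CLAIM (what is proved, stated in full; the proofs are below) =====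
def Claim_equal_coalesce_code_blocks_py : Prop := ∀ (code_blocks : List (String × List String)), Dom_coalesce_code_blocks_py code_blocks → Spec_coalesce_code_blocks_py code_blocks (coalesce_code_blocks_py code_blocks)

-- ===== LEMMAS AND PROOFS =====
-- Invariant of A's fold: once a pair (lang, lines) is the last emitted block and prev = some lang,
-- the fold produces that block extended by the current group, then B's recursion on the rest.
theorem pvFold_inv (xs : List (String × List String)) :
    ∀ (acc : List (String × List String)) (lang : String) (lines : List String),
    (xs.foldl
      (fun (st : List (String × List String) × Option String) b =>
        if some b.1 ≠ st.2 then (st.1 ++ [(b.1, b.2)], some b.1)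
        else (pvExtendLast st.1 b.2, st.2))
      (acc ++ [(lang, lines)], some lang)).1
    = acc ++ (lang, lines ++ (pvTakeGroup lang xs).1) :: coalesce_code_blocks_py_alt (pvTakeGroup lang xs).2 := by
  induction xs with
  | nil => intro acc lang lines; simp [pvTakeGroup, coalesce_code_blocks_py_alt]
  | cons x rest ih =>
      intro acc lang lines
      obtain ⟨l, ls⟩ := x
      by_cases h : l = lang
      · subst h
        simp only [List.foldl_cons]
        rw [if_neg (by simp)]
        simp only [pvTakeGroup]
        simp only [if_true]
        have hlast : pvExtendLast (acc ++ [(l, lines)]) ls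
            = acc ++ [(l, lines ++ "\n" :: ls)] := by
          simp [pvExtendLast]
        rw [hlast, ih acc l (lines ++ "\n" :: ls)]
        simp
      · simp only [List.foldl_cons]
        rw [if_pos (by simpa using h)]
        simp only [pvTakeGroup]
        rw [if_neg h]
        rw [show acc ++ [(lang, lines)] ++ [(l, ls)] = (acc ++ [(lang, lines)]) ++ [(l, ls)] from rfl,
          ih (acc ++ [(lang, lines)]) l ls]
        simp [coalesce_code_blocks_py_alt]

-- ===== VERDICT (by name: the statement is the Claim_ definition above) =====
theorem coalesce_code_blocks_py_spec : Claim_equal_coalesce_code_blocks_py := by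
  intro code_blocks _
  unfold Spec_coalesce_code_blocks_py coalesce_code_blocks_py
  match code_blocks with
  | [] => simp [coalesce_code_blocks_py_alt]
  | (lang, lines) :: rest =>
      simp only [List.foldl_cons]
      rw [if_pos (by simp)]
      have := pvFold_inv rest [] lang lines
      simp only [List.nil_append] at this
      rw [List.nil_append, this]
      simp [coalesce_code_blocks_py_alt]
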